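-- pv_equiv track=rewrite | github.com/Gui-Corby/ML_TechChallenge_01 | app/scraping/production.py | format_production_data
-- ===== SOURCE A (Python) =====
-- def format_production_data(
--     data: list[dict],
--     year: int
-- ) -> list[dict]:
--     year_str = str(year)
--     formatted = []
--     last_category = None
--     year_total = 0
--
--     for item in data:
--         product = item.get("bebida", item.get("produto", "")).strip()
--         if product.isupper():
--             last_category = product
--
--         item = {
--             "categoria": last_category,
--             "bebida": product,
--             "quantidadeL": item.get(year_str, "")
--         }
--
--         formatted.append(item)
--
--     for item in formatted:
--         if item["categoria"] == item["bebida"]: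
--             del item["bebida"]
--             item["quantidadeLTotal"] = item["quantidadeL"]
--             del item["quantidadeL"]
--         item.get("quantidadeLTotal", "0")
--         year_total += int(item.get("quantidadeLTotal", 0))
--
--     formatted.append({
--         "total_ano": str(year_total)
--     })
--
--     return formatted
-- ===== SOURCE B (Python) =====
-- def format_production_data(data, year):
--     # One pass: classify each row as it is seen, emit its final shape directly,
--     # and accumulate the yearly total on the fly.
--     year_str = str(year)
--     out = []
--     last_category = None
--     year_total = 0
--     for item in data:
--         product = item.get("bebida", item.get("produto", "")).strip()
--         value = item.get(year_str, "")
--         if product.isupper():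
--             last_category = product
--             year_total += int(value)
--             out.append({"categoria": product, "quantidadeLTotal": value})
--         else:
--             out.append({"categoria": last_category, "bebida": product, "quantidadeL": value})
--     out.append({"total_ano": str(year_total)})
--     return out
-- ===== Notes on version B (the rewrite author's own statement) =====
-- stated objective: simpler
-- what changed: B replaces A's build-then-rewrite two-pass scheme (first loop builds uniform rows, second loop mutates category rows and sums totals) with a single pass that classifies each row once, emits it in its final shape and accumulates the yearly total on the fly.
import Mathlib
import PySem

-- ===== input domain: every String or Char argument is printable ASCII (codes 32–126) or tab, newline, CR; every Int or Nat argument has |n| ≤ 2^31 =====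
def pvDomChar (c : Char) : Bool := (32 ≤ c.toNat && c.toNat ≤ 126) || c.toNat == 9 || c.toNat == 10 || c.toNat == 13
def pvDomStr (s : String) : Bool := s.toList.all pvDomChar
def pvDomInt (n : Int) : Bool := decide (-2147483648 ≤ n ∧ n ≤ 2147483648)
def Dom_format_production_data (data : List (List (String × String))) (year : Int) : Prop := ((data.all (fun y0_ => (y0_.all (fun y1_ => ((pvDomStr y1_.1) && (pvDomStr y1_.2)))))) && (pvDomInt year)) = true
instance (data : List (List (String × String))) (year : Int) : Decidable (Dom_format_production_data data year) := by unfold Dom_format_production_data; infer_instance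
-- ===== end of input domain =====

-- B fuses A's build-then-rewrite two-pass scheme into a single traversal that emits each
-- row in its final shape and accumulates the yearly total on the fly (objective: simpler).

-- Python str.isupper() on the ASCII domain: at least one cased (alphabetic) character
-- and no lowercase character.  Ported by hand (PySem has only the Char-level predicates);
-- exact on the printable-ASCII domain.  Shared primitive of both ports.
def pyStrIsupper (s : String) : Bool :=
  s.toList.any PySem.Chars.isalpha && s.toList.all (fun c => !(PySem.Chars.islower c))

-- ===== PORT A =====
-- first loop of A: build {"categoria": last_category, "bebida": product, "quantidadeL": …}
def fpdA_pass1 (ystr : String) : List (List (String × String)) → Option String →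
    List (PySem.Dict String (Option String))
  | [], _ => []
  | item :: rest, lc =>
    let d := PySem.Dict.ofList item
    let product := PySem.Str.strip (d.getD "bebida" (d.getD "produto" ""))
    let lc' := if pyStrIsupper product then some product else lc
    PySem.Dict.ofList [("categoria", lc'), ("bebida", some product),
        ("quantidadeL", some (d.getD ystr ""))] :: fpdA_pass1 ystr rest lc'

-- second loop of A: rewrite category rows in place and sum the totals
def fpdA_pass2 : List (PySem.Dict String (Option String)) → Int →
    List (PySem.Dict String (Option String)) × Int
  | [], t => ([], t)
  | item :: rest, t =>
    let item' :=
      if item.get? "categoria" == item.get? "bebida" then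
        -- item["quantidadeL"]: key always present in rows built by pass1 (getD none unreachable)
        ((item.erase "bebida").insert "quantidadeLTotal"
            ((item.get? "quantidadeL").getD none)).erase "quantidadeL"
      else item
    -- int(item.get("quantidadeLTotal", 0)); .getD 0 is unreachable under Pre_ (ValueError),
    -- and a missing key gives int(0) = 0
    let inc : Int :=
      match item'.get? "quantidadeLTotal" with
      | some (some s) => (PySem.Int.ofStr? s).getD 0
      | _ => 0
    let (rest', t') := fpdA_pass2 rest (t + inc)
    (item' :: rest', t')

def format_production_data (data : List (List (String × String))) (year : Int) :
    List (List (String × Option String)) :=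
  let ystr := PySem.Int.toStr year
  let (fs, t) := fpdA_pass2 (fpdA_pass1 ystr data none) 0
  (fs ++ [PySem.Dict.ofList [("total_ano", some (PySem.Int.toStr t))]]).map PySem.Dict.items

-- ===== PORT B =====
-- single loop of B: emit each row in final shape, accumulating the total as we go
def fpdB_loop (ystr : String) : List (List (String × String)) → Option String → Int →
    List (PySem.Dict String (Option String)) × Int
  | [], _, t => ([], t)
  | item :: rest, lc, t =>
    let d := PySem.Dict.ofList item
    let product := PySem.Str.strip (d.getD "bebida" (d.getD "produto" ""))
    let value := d.getD ystr ""
    if pyStrIsupper product then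
      -- .getD 0 unreachable under Pre_ (int(value) would raise ValueError)
      let (r, t') := fpdB_loop ystr rest (some product) (t + (PySem.Int.ofStr? value).getD 0)
      (PySem.Dict.ofList [("categoria", some product), ("quantidadeLTotal", some value)] :: r, t')
    else
      let (r, t') := fpdB_loop ystr rest lc t
      (PySem.Dict.ofList [("categoria", lc), ("bebida", some product),
          ("quantidadeL", some value)] :: r, t')

def format_production_data_alt (data : List (List (String × String))) (year : Int) :
    List (List (String × Option String)) :=
  let ystr := PySem.Int.toStr year
  let (r, t) := fpdB_loop ystr data none 0
  (r ++ [PySem.Dict.ofList [("total_ano", some (PySem.Int.toStr t))]]).map PySem.Dict.items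

-- ===== PRECONDITION & SPEC =====
-- Pre_ excludes inputs on which A raises ValueError: a row whose (stripped) product name is
-- all-uppercase but whose year-column value is not parseable by Python's int() (B raises there too).
def Pre_format_production_data (data : List (List (String × String))) (year : Int) : Prop :=
  ∀ item ∈ data,
    pyStrIsupper (PySem.Str.strip ((PySem.Dict.ofList item).getD "bebida"
        ((PySem.Dict.ofList item).getD "produto" ""))) = true →
    (PySem.Int.ofStr? ((PySem.Dict.ofList item).getD (PySem.Int.toStr year) "")).isSome = true

instance (data : List (List (String × String))) (year : Int) :
    Decidable (Pre_format_production_data data year) := by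
  unfold Pre_format_production_data; infer_instance

def pvWitness_format_production_data : (List (List (String × String))) × Int :=
  ([[("produto", "VINHO DE MESA"), ("2020", "100")], [("produto", "Tinto"), ("2020", "60")]], 2020)

def Spec_format_production_data (data : List (List (String × String))) (year : Int)
    (out : List (List (String × Option String))) : Prop :=
  out = format_production_data_alt data year

instance (data : List (List (String × String))) (year : Int)
    (out : List (List (String × Option String))) :
    Decidable (Spec_format_production_data data year out) := by
  unfold Spec_format_production_data; infer_instance

-- ===== CLAIM (what is proved, stated in full; the proofs are below) =====
def Claim_equal_format_production_data : Prop :=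
  ∀ (data : List (List (String × String))) (year : Int),
    Dom_format_production_data data year → Pre_format_production_data data year →
    Spec_format_production_data data year (format_production_data data year)

-- ===== LEMMAS AND PROOFS =====

-- the two passes of A fuse into B's single loop, provided every stored last_category
-- is an all-uppercase product (the invariant A's first loop maintains)
theorem fpd_fuse (ystr : String) (data : List (List (String × String)))
    (lc : Option String) (t : Int)
    (hlc : ∀ c, lc = some c → pyStrIsupper c = true) :
    fpdA_pass2 (fpdA_pass1 ystr data lc) t = fpdB_loop ystr data lc t := by
  induction data generalizing lc t with
  | nil => rfl
  | cons item rest ih =>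
    simp only [fpdA_pass1, fpdA_pass2, fpdB_loop]
    set p := PySem.Str.strip ((PySem.Dict.ofList item).getD "bebida"
        ((PySem.Dict.ofList item).getD "produto" "")) with hp
    set v := (PySem.Dict.ofList item).getD ystr "" with hv
    by_cases hu : pyStrIsupper p = true
    · simp only [hu, if_true]
      rw [ih _ _ (fun c hc => by cases hc; exact hu)]
      simp [PySem.Dict.ofList, PySem.Dict.update, PySem.Dict.get?, PySem.Dict.erase,
        PySem.Dict.insert, PySem.Dict.contains,
        PySem.Dict.empty, List.find?, List.filter, List.foldl, List.any]
    · simp only [hu, if_false, Bool.false_eq_true]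
      rw [ih _ _ hlc]
      have hne : (lc == some p) = false := by
        cases h : lc with
        | none => rfl
        | some c =>
          simp only [Option.some_beq_some, beq_eq_false_iff_ne, ne_eq]
          intro hc
          exact hu (hc ▸ hlc c h)
      simp [PySem.Dict.ofList, PySem.Dict.update, PySem.Dict.get?,
        PySem.Dict.empty, PySem.Dict.insert, PySem.Dict.contains, List.find?, List.foldl,
        List.any, hne]

-- ===== VERDICT (by name: the statement is the Claim_ definition above) =====
theorem format_production_data_spec : Claim_equal_format_production_data := by
  intro data year _ _
  unfold Spec_format_production_data format_production_data format_production_data_alt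
  have h := fun (ystr : String) (d : List (List (String × String))) (t : Int) =>
    fpd_fuse ystr d none t (fun c hc => by cases hc)
  simp only [h]
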